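-- pv_equiv track=rewrite | github.com/ferraritomas/InformaticaGeneral | Prácticas/ARCHIVOS/ARCHIVOS_PARCIALES.py | buscarS
-- ===== SOURCE A (Python) =====
-- def buscarS(xs,s):
--     ini = -1
--     fin = -1
--     i = 0
--     bandera = False
--     while i<len(xs):
--         if bandera==False and xs[i:i+len(s)]==s:
--             ini = len(xs[0:i])
--             fin = len(xs[0:i+len(s)-1])
--             bandera = True
--         i+=1
--     return (ini,fin)
-- ===== SOURCE B (Python) =====
-- def buscarS(xs, s):
--     i = xs.find(s)
--     if i == -1:
--         return (-1, -1)
--     return (i, i + len(s) - 1)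
-- ===== Notes on version B (the rewrite author's own statement) =====
-- stated objective: faster
-- what changed: Replaces A's scan that re-slices and compares at every position (and keeps scanning after the first match under a flag) with a single str.find call that stops at the first occurrence and computes the end index arithmetically.
-- outside the precondition, e.g. on buscarS('ab', ''): A returns (0, 1), B returns (0, -1)
import Mathlib
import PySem

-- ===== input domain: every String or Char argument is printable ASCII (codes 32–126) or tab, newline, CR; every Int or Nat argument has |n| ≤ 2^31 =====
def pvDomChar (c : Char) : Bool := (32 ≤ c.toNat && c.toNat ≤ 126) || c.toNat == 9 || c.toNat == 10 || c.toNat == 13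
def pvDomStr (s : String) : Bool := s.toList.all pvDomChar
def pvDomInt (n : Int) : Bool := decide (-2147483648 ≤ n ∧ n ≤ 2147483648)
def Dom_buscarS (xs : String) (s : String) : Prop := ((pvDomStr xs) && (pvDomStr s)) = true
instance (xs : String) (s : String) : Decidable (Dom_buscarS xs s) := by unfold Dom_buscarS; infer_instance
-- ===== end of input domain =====

-- B replaces A's position-by-position slice-and-compare scan with a single find call: faster at the first occurrence.

-- ===== PORT A =====
-- step of the while loop, on the state (ini, fin, bandera)
def buscarS_step (cs ss : List Char) (st : Int × Int × Bool) (i : Int) : Int × Int × Bool :=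
  if st.2.2 = false ∧ PySem.List.slice cs (some i) (some (i + (ss.length : Int))) = ss then
    (((PySem.List.slice cs (some 0) (some i)).length : Int),
     ((PySem.List.slice cs (some 0) (some (i + (ss.length : Int) - 1))).length : Int),
     true)
  else st

def buscarS (xs : String) (s : String) : List Int :=
  let st := (PySem.List.pyRange 0 (PySem.Str.len xs) 1).foldl (buscarS_step xs.toList s.toList) (-1, -1, false)
  [st.1, st.2.1]

-- ===== PORT B =====
def buscarS_alt (xs : String) (s : String) : List Int :=
  let i := PySem.Str.find xs s
  if i = -1 then [-1, -1] else [i, i + PySem.Str.len s - 1]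

-- ===== PRECONDITION & SPEC =====
-- Pre_ excludes the empty pattern s, a corner nobody would specify: A's (0, len(xs)-1) there is an
-- accident of slice clamping and B's (0, -1) follows str.find's convention — both are defensible.
def Pre_buscarS (_xs : String) (s : String) : Prop := s ≠ ""
instance (xs : String) (s : String) : Decidable (Pre_buscarS xs s) := by unfold Pre_buscarS; infer_instance
def pvWitness_buscarS : String × String := ("hello", "ll")

def Spec_buscarS (xs : String) (s : String) (out : List Int) : Prop := out = buscarS_alt xs s
instance (xs : String) (s : String) (out : List Int) : Decidable (Spec_buscarS xs s out) := by unfold Spec_buscarS; infer_instance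

-- ===== CLAIM (what is proved, stated in full; the proofs are below) =====
def Claim_equal_buscarS : Prop := ∀ (xs : String) (s : String), Dom_buscarS xs s → Pre_buscarS xs s → Spec_buscarS xs s (buscarS xs s)

-- ===== LEMMAS AND PROOFS =====

-- once bandera is true the loop state never changes
theorem buscarS_step_frozen (cs ss : List Char) (l : List Int) (a b : Int) :
    l.foldl (buscarS_step cs ss) (a, b, true) = (a, b, true) := by
  induction l with
  | nil => rfl
  | cons i t ih => simpa [buscarS_step] using ih

-- before the first occurrence the state stays at the initial value
theorem buscarS_fold_nomatch (cs ss : List Char) (l : List Int)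
    (h : ∀ i ∈ l, PySem.List.slice cs (some i) (some (i + (ss.length : Int))) ≠ ss) :
    l.foldl (buscarS_step cs ss) (-1, -1, false) = (-1, -1, false) := by
  induction l with
  | nil => rfl
  | cons i t ih =>
      have hi := h i (List.mem_cons_self ..)
      simp only [List.foldl_cons, buscarS_step, hi, and_false, if_false]
      exact ih (fun j hj => h j (List.mem_cons_of_mem _ hj))

-- a slice xs[i:i+m] equal to ss (with m = ss.length, i = j ≥ 0) means ss is a prefix of cs.drop j
theorem slice_eq_iff_prefix (cs ss : List Char) (j : Nat) :
    PySem.List.slice cs (some (j : Int)) (some ((j : Int) + (ss.length : Int))) = ss ↔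
      ss <+: cs.drop j := by
  have : ((j : Int) + (ss.length : Int)) = ((j + ss.length : Nat) : Int) := by push_cast; ring
  rw [this, PySem.List.slice_natCast]
  have h2 : (j + ss.length - j) = ss.length := by omega
  rw [h2]
  constructor
  · intro h; rw [← h]; exact List.take_prefix _ _
  · intro h; exact ((List.prefix_iff_eq_take.mp h).symm)

theorem buscarS_spec' (xs : String) (s : String) (hs : s ≠ "") :
    buscarS xs s = buscarS_alt xs s := by
  have hssne : s.toList ≠ [] := fun h => hs (String.toList_eq_nil_iff.mp h)
  have hm1 : 1 ≤ s.toList.length := List.length_pos_iff.mpr hssne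
  unfold buscarS buscarS_alt
  simp only [PySem.Str.len_eq, PySem.Str.find_eq]
  set cs := xs.toList with hcs
  set ss := s.toList with hss
  by_cases hf : PySem.Chars.find cs ss = -1
  · -- no occurrence anywhere: the loop never fires, both return [-1, -1]
    have hno : ¬ ss <:+: cs := (PySem.Chars.find_eq_neg_one_iff cs ss).mp hf
    have hall : ∀ i ∈ PySem.List.pyRange 0 (cs.length : Int) 1,
        PySem.List.slice cs (some i) (some (i + (ss.length : Int))) ≠ ss := by
      intro i hi heq
      obtain ⟨h0, _⟩ := PySem.List.mem_pyRange_one.mp hi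
      obtain ⟨j, rfl⟩ := Int.eq_ofNat_of_zero_le h0
      exact hno (((slice_eq_iff_prefix cs ss j).mp heq).isInfix.trans (List.drop_suffix j cs).isInfix)
    rw [buscarS_fold_nomatch cs ss _ hall]
    simp [hf]
  · -- first occurrence at k = (find cs ss).toNat
    have hnn : 0 ≤ PySem.Chars.find cs ss := by
      have := PySem.Chars.neg_one_le_find cs ss; omega
    obtain ⟨hpre, hmin⟩ := PySem.Chars.find_spec hnn
    set k := (PySem.Chars.find cs ss).toNat with hk
    have hfk : PySem.Chars.find cs ss = (k : Int) := (Int.toNat_of_nonneg hnn).symm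
    have hkle : k ≤ cs.length := by
      have := PySem.Chars.find_le_length cs ss; omega
    have hkm : k + ss.length ≤ cs.length := by
      have hlen := hpre.length_le
      rw [List.length_drop] at hlen
      omega
    have hkn : k < cs.length := by omega
    rw [PySem.List.pyRange_one_append 0 (k : Int) (cs.length : Int) (by positivity)
          (by exact_mod_cast hkle), List.foldl_append]
    rw [buscarS_fold_nomatch cs ss _ (by
      intro i hi heq
      obtain ⟨h0, hlt⟩ := PySem.List.mem_pyRange_one.mp hi
      obtain ⟨j, rfl⟩ := Int.eq_ofNat_of_zero_le h0
      exact hmin j (by exact_mod_cast hlt) ((slice_eq_iff_prefix cs ss j).mp heq))]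
    rw [PySem.List.pyRange_one_cons (by exact_mod_cast hkn), List.foldl_cons]
    have hcond : PySem.List.slice cs (some (k : Int)) (some ((k : Int) + (ss.length : Int))) = ss :=
      (slice_eq_iff_prefix cs ss k).mpr hpre
    rw [show buscarS_step cs ss (-1, -1, false) (k : Int)
          = (((PySem.List.slice cs (some 0) (some (k : Int))).length : Int),
             ((PySem.List.slice cs (some 0) (some ((k : Int) + (ss.length : Int) - 1))).length : Int),
             true) from by simp [buscarS_step, hcond]]
    rw [buscarS_step_frozen]
    have e1 : (PySem.List.slice cs (some 0) (some (k : Int))).length = k := by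
      rw [PySem.List.slice_zero_start, PySem.List.slice_to_natCast, List.length_take]
      omega
    have e2 : (PySem.List.slice cs (some 0) (some ((k : Int) + (ss.length : Int) - 1))).length
        = k + ss.length - 1 := by
      have : (k : Int) + (ss.length : Int) - 1 = ((k + ss.length - 1 : Nat) : Int) := by
        omega
      rw [PySem.List.slice_zero_start, this, PySem.List.slice_to_natCast, List.length_take]
      omega
    simp only [e1, e2, hfk, if_neg (by omega : ¬ ((k : Int) = -1))]
    have : ((k + ss.length - 1 : Nat) : Int) = (k : Int) + (ss.length : Int) - 1 := by omega
    rw [this]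

-- ===== VERDICT (by name: the statement is the Claim_ definition above) =====
theorem buscarS_spec : Claim_equal_buscarS := by
  intro xs s _ hpre
  exact buscarS_spec' xs s hpre
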